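-- pv_equiv track=rewrite | github.com/EgeUylas/multipass_backend | proxy_agent1.py | is_potential_multipass_command
-- ===== SOURCE A (Python) =====
-- def is_potential_multipass_command(cmd: str) -> bool:
--     """Check if a command looks like a multipass command even without the 'multipass' prefix"""
--     cmd = cmd.strip().lower()
--     multipass_keywords = [
--         'launch', 'create', 'start', 'stop', 'delete', 'remove', 'list',
--         'info', 'shell', 'exec', 'mount', 'umount', 'transfer', 'copy',
--         'suspend', 'restart', 'recover', 'purge', 'find', 'get', 'set'
--     ]
--     # Check if command starts with any multipass keyword
--     for keyword in multipass_keywords: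
--         if cmd.startswith(keyword + ' ') or cmd == keyword:
--             return True
--     # Check for common multipass patterns
--     if any(pattern in cmd for pattern in ['-n ', '--name ', '-c ', '--cpus ', '-m ', '--memory ', '-d ', '--disk ']):
--         return True
--     return False
-- ===== SOURCE B (Python) =====
-- _KEYWORDS = frozenset({
--     'launch', 'create', 'start', 'stop', 'delete', 'remove', 'list',
--     'info', 'shell', 'exec', 'mount', 'umount', 'transfer', 'copy',
--     'suspend', 'restart', 'recover', 'purge', 'find', 'get', 'set'
-- })
-- _PATTERNS = ('-n ', '--name ', '-c ', '--cpus ', '-m ', '--memory ', '-d ', '--disk ')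
--
-- def is_potential_multipass_command(cmd: str) -> bool:
--     """Check if a command looks like a multipass command even without the 'multipass' prefix"""
--     c = cmd.strip().lower()
--     first = None
--     flag = False
--     # one pass: grab the first word at the first space; test flag patterns only
--     # at '-' positions (every pattern starts with '-') by fixed-length slice compare
--     for i, ch in enumerate(c):
--         if first is None and ch == ' ':
--             first = c[:i]
--         if not flag and ch == '-':
--             flag = any(c[i:i + len(p)] == p for p in _PATTERNS)
--     if first is None:
--         first = c
--     return first in _KEYWORDS or flag
-- ===== Notes on version B (the rewrite author's own statement) =====
-- stated objective: alternative
-- what changed: A's staged per-keyword startswith loop plus any(pattern in cmd) substring scans are replaced by one fused left-to-right pass that captures the first word at the first space and tests the flag patterns only at positions holding a dash (every pattern starts with one) via fixed-length slice comparison, then one set membership test.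
import Mathlib
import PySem

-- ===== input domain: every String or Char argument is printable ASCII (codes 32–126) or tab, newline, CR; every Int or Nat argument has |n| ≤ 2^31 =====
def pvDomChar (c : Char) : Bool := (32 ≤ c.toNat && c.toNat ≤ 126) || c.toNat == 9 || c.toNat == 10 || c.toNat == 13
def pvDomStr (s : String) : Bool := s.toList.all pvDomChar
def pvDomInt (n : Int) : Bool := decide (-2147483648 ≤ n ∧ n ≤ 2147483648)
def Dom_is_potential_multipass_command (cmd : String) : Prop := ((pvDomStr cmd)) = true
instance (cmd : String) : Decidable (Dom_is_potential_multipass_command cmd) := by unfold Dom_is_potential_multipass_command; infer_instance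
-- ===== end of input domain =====

-- B replaces A's staged keyword loop + substring scans by one fused pass that grabs the
-- first word at the first space and tests the flag patterns only at '-' positions (alternative).

-- ===== PORT A =====
def mpKeywordsA : List String :=
  ["launch", "create", "start", "stop", "delete", "remove", "list",
   "info", "shell", "exec", "mount", "umount", "transfer", "copy",
   "suspend", "restart", "recover", "purge", "find", "get", "set"]

def mpPatternsA : List String :=
  ["-n ", "--name ", "-c ", "--cpus ", "-m ", "--memory ", "-d ", "--disk "]

def is_potential_multipass_command (cmd : String) : Bool :=
  let c := PySem.Str.lower (PySem.Str.strip cmd)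
  -- for keyword in multipass_keywords: if cmd.startswith(keyword + ' ') or cmd == keyword: return True
  if mpKeywordsA.any (fun k => PySem.Str.startswith c (k ++ " ") || c == k) then true
  -- if any(pattern in cmd for pattern in [...]): return True
  else if mpPatternsA.any (fun p => PySem.Str.isIn p c) then true
  else false

-- ===== PORT B =====
def mpKeywordSet : PySem.Set String :=
  PySem.Set.ofList
    ["launch", "create", "start", "stop", "delete", "remove", "list",
     "info", "shell", "exec", "mount", "umount", "transfer", "copy",
     "suspend", "restart", "recover", "purge", "find", "get", "set"]

def mpPatternsB : List String :=
  ["-n ", "--name ", "-c ", "--cpus ", "-m ", "--memory ", "-d ", "--disk "]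

-- the fused "for i, ch in enumerate(c)" loop; state = (first, flag)
def mpLoopB (c : List Char) : List (Int × Char) → Option (List Char) → Bool → Option (List Char) × Bool
  | [], first, flag => (first, flag)
  | (i, ch) :: rest, first, flag =>
    -- if first is None and ch == ' ': first = c[:i]
    let first' := if first.isNone && (ch == ' ') then some (PySem.List.slice c none (some i)) else first
    -- if not flag and ch == '-': flag = any(c[i:i+len(p)] == p for p in _PATTERNS)
    let flag' := if (!flag) && (ch == '-') then
        mpPatternsB.any (fun p => PySem.List.slice c (some i) (some (i + (p.length : Int))) == p.toList)
      else flag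
    mpLoopB c rest first' flag'

def is_potential_multipass_command_alt (cmd : String) : Bool :=
  let c := PySem.Str.lower (PySem.Str.strip cmd)
  let r := mpLoopB c.toList (PySem.List.enumerate c.toList 0) none false
  -- if first is None: first = c
  let first := r.1.getD c.toList
  PySem.Set.contains mpKeywordSet (String.ofList first) || r.2

-- ===== PRECONDITION & SPEC =====
def Spec_is_potential_multipass_command (cmd : String) (out : Bool) : Prop := out = is_potential_multipass_command_alt cmd
instance (cmd : String) (out : Bool) : Decidable (Spec_is_potential_multipass_command cmd out) := by unfold Spec_is_potential_multipass_command; infer_instance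

-- ===== CLAIM (what is proved, stated in full; the proofs are below) =====
def Claim_equal_is_potential_multipass_command : Prop := ∀ (cmd : String), Dom_is_potential_multipass_command cmd → Spec_is_potential_multipass_command cmd (is_potential_multipass_command cmd)

-- ===== LEMMAS AND PROOFS =====

-- the first-word value, stated on the char-list side
def pvFirstWord (s : List Char) : List Char :=
  if PySem.Chars.find s [' '] < 0 then s else s.take (PySem.Chars.find s [' ']).toNat

-- core lemma: for a space-free keyword k, A's test "startswith (k ++ ' ') or equals k"
-- holds exactly when the first space-delimited word of s is k
theorem keyword_test_eq (s k : List Char) (hk : ' ' ∉ k) :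
    (PySem.Chars.startswith s (k ++ [' ']) || s == k) = (pvFirstWord s == k) := by
  unfold pvFirstWord
  by_cases h : PySem.Chars.find s [' '] < 0
  · rw [if_pos h]
    have hne : PySem.Chars.find s [' '] = -1 := by
      have := PySem.Chars.neg_one_le_find s [' ']
      omega
    have hinf : ¬ [' '] <:+: s := (PySem.Chars.find_eq_neg_one_iff s [' ']).mp hne
    have hsw : PySem.Chars.startswith s (k ++ [' ']) = false := by
      rw [Bool.eq_false_iff]
      intro hc
      have hp : (k ++ [' ']) <+: s := (PySem.Chars.startswith_iff s (k ++ [' '])).mp hc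
      exact hinf ((List.suffix_append k [' ']).isInfix.trans hp.isInfix)
    simp [hsw]
  · rw [if_neg h]
    rw [not_lt] at h
    obtain ⟨hpre, hmin⟩ := PySem.Chars.find_spec (s := s) (sub := [' ']) h
    set n := (PySem.Chars.find s [' ']).toNat with hn
    obtain ⟨t, ht⟩ := hpre
    simp only [List.singleton_append] at ht
    have hmem : ' ' ∈ s := by
      have : ' ' ∈ s.drop n := by rw [← ht]; exact List.mem_cons_self
      exact List.mem_of_mem_drop this
    have hnek : s ≠ k := fun hh => hk (hh ▸ hmem)
    have hsk : (s == k) = false := by simpa using hnek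
    rw [hsk, Bool.or_false]
    rw [Bool.eq_iff_iff, PySem.Chars.startswith_iff, beq_iff_eq]
    constructor
    · rintro ⟨u, hu⟩
      rw [List.append_assoc] at hu
      have hdrop : s.drop k.length = ' ' :: u := by
        rw [← hu, List.drop_left]; rfl
      have h1 : ¬ k.length < n := by
        intro hlt
        exact hmin k.length hlt ⟨u, by rw [hdrop]; simp⟩
      have h2 : ¬ n < k.length := by
        intro hlt
        have hd : s.drop n = k.drop n ++ (' ' :: u) := by
          conv_lhs => rw [← hu]
          rw [List.drop_append_of_le_length (by omega)]; rfl
        have hkd : k.drop n ≠ [] := by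
          simp [List.drop_eq_nil_iff]; omega
        have : (k.drop n).head? = some ' ' := by
          have h5 := congrArg List.head? hd
          rw [← ht] at h5
          rwa [List.head?_append_of_ne_nil _ hkd, List.head?_cons, eq_comm] at h5
        exact hk (List.mem_of_mem_drop (List.mem_of_mem_head? this))
      have hlen : k.length = n := by omega
      rw [← hlen, ← hu, List.take_left]
    · intro htake
      refine ⟨t, ?_⟩
      rw [List.append_assoc, List.singleton_append, ← htake, ht, List.take_append_drop]

-- String `==` mirrors `==` on the code-point lists
theorem str_beq_toList (c k : String) : (c == k) = (c.toList == k.toList) := by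
  rw [Bool.eq_iff_iff, beq_iff_eq, beq_iff_eq]
  constructor
  · exact congrArg String.toList
  · intro h; have h2 := congrArg String.ofList h; simpa using h2

theorem ofList_beq (w : List Char) (k : String) : (String.ofList w == k) = (w == k.toList) := by
  rw [Bool.eq_iff_iff, beq_iff_eq, beq_iff_eq]
  constructor
  · intro h; rw [← h]; simp
  · intro h; have h2 := congrArg String.ofList h; simpa using h2

-- A's per-keyword test, at String level, equals "the first word of c is k"
theorem keyA_str (c k : String) (hk : ' ' ∉ k.toList) :
    (PySem.Str.startswith c (k ++ " ") || c == k) = (String.ofList (pvFirstWord c.toList) == k) := by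
  have h1 : PySem.Str.startswith c (k ++ " ") = PySem.Chars.startswith c.toList (k.toList ++ [' ']) := by
    simp [String.toList_append]
  rw [h1, str_beq_toList, keyword_test_eq c.toList k.toList hk]
  exact (ofList_beq _ _).symm

theorem pv_any_congr_mem {α : Type} (l : List α) (p q : α → Bool)
    (h : ∀ a ∈ l, p a = q a) : l.any p = l.any q := by
  induction l with
  | nil => rfl
  | cons x xs ih =>
    simp only [List.any_cons]
    rw [h x (by simp), ih (fun a ha => h a (by simp [ha]))]

-- A's keyword loop equals the set-membership test of the first word
theorem anyA_eq (c : String) :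
    (mpKeywordsA.any fun k => PySem.Str.startswith c (k ++ " ") || c == k)
    = PySem.Set.contains mpKeywordSet (String.ofList (pvFirstWord c.toList)) := by
  have hks : ∀ k ∈ mpKeywordsA, ' ' ∉ k.toList := by decide
  have h1 : (mpKeywordsA.any fun k => PySem.Str.startswith c (k ++ " ") || c == k)
      = mpKeywordsA.any fun k => String.ofList (pvFirstWord c.toList) == k := by
    apply pv_any_congr_mem
    intro k hkmem
    exact keyA_str c k (hks k hkmem)
  rw [h1, List.any_beq]
  rw [Bool.eq_iff_iff, PySem.Set.contains_iff]
  simp [mpKeywordSet, mpKeywordsA, PySem.Set.mem_ofList]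

theorem ite_ite_or (a b : Bool) : (if a then true else if b then true else false) = (a || b) := by
  cases a <;> cases b <;> rfl

-- ----- B's fused loop: the two state components evolve independently -----

def mpPatAt (c : List Char) (i : Int) : Bool :=
  mpPatternsB.any (fun p => PySem.List.slice c (some i) (some (i + (p.length : Int))) == p.toList)

-- flag component of the loop
theorem mpLoopB_snd (c : List Char) (l : List (Int × Char)) (first : Option (List Char)) (flag : Bool) :
    (mpLoopB c l first flag).2 = (flag || l.any (fun q => (q.2 == '-') && mpPatAt c q.1)) := by
  induction l generalizing first flag with
  | nil => simp [mpLoopB]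
  | cons q rest ih =>
    obtain ⟨i, ch⟩ := q
    simp only [mpLoopB, List.any_cons, ih, mpPatAt]
    cases flag <;> cases hch : (ch == '-') <;> simp

-- first component of the loop, once set, stays
theorem mpLoopB_fst_some (c : List Char) (l : List (Int × Char)) (w : List Char) (flag : Bool) :
    (mpLoopB c l (some w) flag).1 = some w := by
  induction l generalizing flag with
  | nil => rfl
  | cons q rest ih =>
    obtain ⟨i, ch⟩ := q
    simp only [mpLoopB, Option.isNone_some, Bool.false_and]
    exact ih _

-- the first component scans for the first space
def mpFirstSp (c : List Char) : List (Int × Char) → Option (List Char)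
  | [] => none
  | (i, ch) :: rest => if ch == ' ' then some (PySem.List.slice c none (some i)) else mpFirstSp c rest

theorem mpLoopB_fst_none (c : List Char) (l : List (Int × Char)) (flag : Bool) :
    (mpLoopB c l none flag).1 = mpFirstSp c l := by
  induction l generalizing flag with
  | nil => rfl
  | cons q rest ih =>
    obtain ⟨i, ch⟩ := q
    simp only [mpLoopB, mpFirstSp, Option.isNone_none, Bool.true_and]
    by_cases hch : (ch == ' ') = true
    · rw [if_pos hch, if_pos hch]
      exact mpLoopB_fst_some c rest _ _
    · rw [if_neg hch, if_neg hch]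
      exact ih _

-- mpFirstSp over an enumeration finds the index of the first space
theorem mpFirstSp_enum (c xs : List Char) (s : Int) :
    mpFirstSp c (PySem.List.enumerate xs s)
      = (xs.findIdx? (fun ch => ch == ' ')).map (fun k => PySem.List.slice c none (some (s + (k : Int)))) := by
  induction xs generalizing s with
  | nil => simp [PySem.List.enumerate_nil, mpFirstSp]
  | cons x xs ih =>
    rw [PySem.List.enumerate_cons]
    simp only [mpFirstSp, List.findIdx?_cons]
    by_cases hx : (x == ' ') = true
    · rw [if_pos hx, if_pos hx]
      simp
    · rw [if_neg hx, if_neg hx, ih]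
      cases h : xs.findIdx? (fun ch => ch == ' ') with
      | none => simp
      | some k =>
        have hc : s + 1 + (k : Int) = s + ((k : Nat) + 1 : Nat) := by push_cast; ring
        simp [hc]

-- [' '] is a prefix of drop m ↔ position m holds a space
theorem space_prefix_drop (s : List Char) (m : Nat) :
    [' '] <+: s.drop m ↔ ∃ h : m < s.length, s[m] = ' ' := by
  constructor
  · rintro ⟨t, ht⟩
    have hlen : m < s.length := by
      by_contra hge
      rw [List.drop_eq_nil_of_le (by omega)] at ht
      simp at ht
    refine ⟨hlen, ?_⟩
    have hh : s[m]? = some ' ' := by simpa using (congrArg List.head? ht).symm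
    simpa [List.getElem?_eq_getElem hlen] using hh
  · rintro ⟨hlen, hsp⟩
    refine ⟨s.drop (m + 1), ?_⟩
    rw [List.singleton_append, ← hsp]
    exact (List.drop_eq_getElem_cons hlen).symm

-- Chars.find of [' '] computes findIdx? of a space
theorem find_space_eq_findIdx (s : List Char) :
    PySem.Chars.find s [' ']
      = (match s.findIdx? (fun ch => ch == ' ') with | none => -1 | some k => (k : Int)) := by
  cases h : s.findIdx? (fun ch => ch == ' ') with
  | none =>
    have hnm : ' ' ∉ s := by
      intro hm
      obtain ⟨k, hk, hks⟩ := List.getElem_of_mem hm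
      have := List.findIdx?_eq_none_iff.mp h ' ' hm
      simp at this
    apply (PySem.Chars.find_eq_neg_one_iff s [' ']).mpr
    intro hinf
    exact hnm (hinf.mem List.mem_cons_self)
  | some k =>
    obtain ⟨hk, hks, hmin⟩ := List.findIdx?_eq_some_iff_getElem.mp h
    have hkp : s[k] = ' ' := by simpa using hks
    have hne : PySem.Chars.find s [' '] ≠ -1 := by
      rw [Ne, PySem.Chars.find_eq_neg_one_iff, not_not]
      exact (((space_prefix_drop s k).mpr ⟨hk, hkp⟩).isInfix.trans (List.drop_suffix k s).isInfix)
    have h0 : 0 ≤ PySem.Chars.find s [' '] := by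
      have := PySem.Chars.neg_one_le_find s [' ']
      omega
    obtain ⟨hpre, hmin2⟩ := PySem.Chars.find_spec (s := s) (sub := [' ']) h0
    set n := (PySem.Chars.find s [' ']).toNat with hn
    have h1 : ¬ n < k := by
      intro hlt
      obtain ⟨hnlen, hnsp⟩ := (space_prefix_drop s n).mp hpre
      have := hmin n hlt
      simp [hnsp] at this
    have h2 : ¬ k < n := by
      intro hlt
      exact hmin2 k hlt ((space_prefix_drop s k).mpr ⟨hk, hkp⟩)
    have hnk : n = k := by omega
    show PySem.Chars.find s [' '] = (k : Int)
    omega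

-- B's resulting first word equals pvFirstWord
theorem firstB_eq (c : List Char) (flag : Bool) :
    ((mpLoopB c (PySem.List.enumerate c 0) none flag).1).getD c = pvFirstWord c := by
  rw [mpLoopB_fst_none, mpFirstSp_enum, pvFirstWord, find_space_eq_findIdx]
  cases h : c.findIdx? (fun ch => ch == ' ') with
  | none => simp
  | some k =>
    have h0 : ¬ ((k : Int) < 0) := by omega
    rw [if_neg h0]
    simp [PySem.List.slice_to_natCast]

-- every flag pattern starts with '-'
theorem patterns_head : ∀ p ∈ mpPatternsB, p.toList.head? = some '-' := by decide

-- B's flag equals A's "any pattern is a substring"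
theorem flagB_eq (c : List Char) :
    ((PySem.List.enumerate c 0).any (fun q => (q.2 == '-') && mpPatAt c q.1))
      = mpPatternsB.any (fun p => PySem.Chars.isIn p.toList c) := by
  rw [Bool.eq_iff_iff]
  simp only [List.any_eq_true, Bool.and_eq_true, beq_iff_eq]
  constructor
  · rintro ⟨q, hq, hdash, hpat⟩
    obtain ⟨k, hk, rfl⟩ := (PySem.List.mem_enumerate_iff _ _ _).mp hq
    simp only [mpPatAt, List.any_eq_true, beq_iff_eq] at hpat
    obtain ⟨p, hp, hslice⟩ := hpat
    refine ⟨p, hp, (PySem.Chars.isIn_iff_infix _ _).mpr ?_⟩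
    have hcast : (0 : Int) + (k : Int) = ((k : Nat) : Int) := by ring
    rw [hcast, PySem.List.slice_natCast_add] at hslice
    have hpref : p.toList <+: c.drop k := by
      rw [List.prefix_iff_eq_take]
      have : p.toList.length = p.length := by simp
      rw [this, ← hslice]
    exact hpref.isInfix.trans (List.drop_suffix k c).isInfix
  · rintro ⟨p, hp, hin⟩
    obtain ⟨pre, suf, hps⟩ := (PySem.Chars.isIn_iff_infix _ _).mp hin
    have hplen : 0 < p.toList.length := by
      have := patterns_head p hp
      cases hpl : p.toList with
      | nil => rw [hpl] at this; simp at this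
      | cons a t => simp
    set k := pre.length with hkdef
    have hplen' : 0 < p.length := by simpa using hplen
    have hklen : k < c.length := by
      rw [← hps]
      simp
      omega
    have hdropk : c.drop k = p.toList ++ suf := by
      rw [← hps, List.append_assoc, List.drop_left]
    have hck : GetElem.getElem c k hklen = '-' := by
      have hh : (c.drop k).head? = some '-' := by
        rw [hdropk, List.head?_append_of_ne_nil _ (by rwa [← List.length_pos_iff])]
        exact patterns_head p hp
      rw [List.head?_drop] at hh
      simpa [List.getElem?_eq_getElem hklen] using hh
    refine ⟨((k : Int), GetElem.getElem c k hklen), (PySem.List.mem_enumerate_iff _ _ _).mpr ⟨k, hklen, by simp⟩, hck, ?_⟩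
    simp only [mpPatAt, List.any_eq_true, beq_iff_eq]
    refine ⟨p, hp, ?_⟩
    have hcast : (k : Int) + ((p.length : Nat) : Int) = ((k : Nat) : Int) + ((p.length : Nat) : Int) := rfl
    rw [PySem.List.slice_natCast_add, hdropk]
    have : p.toList.length = p.length := by simp
    rw [← this, List.take_left]

-- ===== VERDICT (by name: the statement is the Claim_ definition above) =====
theorem is_potential_multipass_command_spec : Claim_equal_is_potential_multipass_command := by
  intro cmd _
  unfold Spec_is_potential_multipass_command
  simp only [is_potential_multipass_command, is_potential_multipass_command_alt]
  rw [ite_ite_or, anyA_eq]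
  rw [mpLoopB_snd, firstB_eq, Bool.false_or, flagB_eq]
  have hp : (mpPatternsA.any fun p => PySem.Str.isIn p (PySem.Str.lower (PySem.Str.strip cmd)))
      = mpPatternsB.any (fun p => PySem.Chars.isIn p.toList (PySem.Str.lower (PySem.Str.strip cmd)).toList) := by
    apply pv_any_congr_mem
    intro p hpm
    simp
  rw [hp]
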